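-- pv_equiv track=rewrite | github.com/star-jay/d100 | src/wfc/utils.py | eight_versions
-- ===== SOURCE A (Python) =====
-- def switch_rows(matrix):
--     return [
--         [
--             value
--             for x, value in enumerate(row)
--         ]
--         for y, row in enumerate(matrix[::-1])
--     ]
--
-- def switch_cols(matrix):
--     return [
--         row[-1::-1]
--         for y, row in enumerate(matrix)
--     ]
--
-- def rows_to_cols(matrix):
--     return [
--         [
--             matrix[x][y]
--             for x, value in enumerate(row)
--         ]
--         for y, row in enumerate(matrix)
--     ]
--
-- def eight_versions(magic):
--     # 1
--     squares = [magic, ]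
--     # 2
--     squares.extend([
--         switch_rows(square)
--         for square in squares
--     ])
--     # 4
--     squares.extend([
--         switch_cols(square)
--         for square in squares
--     ])
--     # 8
--     squares.extend([
--         rows_to_cols(square)
--         for square in squares
--     ])
--     return squares
-- ===== SOURCE B (Python) =====
-- def eight_versions(magic):
--     # Direct construction: one index-remap comprehension per dihedral symmetry,
--     # in the order [id, flipV, flipH, flipH.flipV, T, T.flipV, T.flipH, T.flipH.flipV].
--     n = len(magic)
--     r = range(n)
--     return [
--         magic,
--         [[magic[n - 1 - y][x] for x in r] for y in r],
--         [[magic[y][n - 1 - x] for x in r] for y in r],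
--         [[magic[n - 1 - y][n - 1 - x] for x in r] for y in r],
--         [[magic[x][y] for x in r] for y in r],
--         [[magic[n - 1 - x][y] for x in r] for y in r],
--         [[magic[x][n - 1 - y] for x in r] for y in r],
--         [[magic[n - 1 - x][n - 1 - y] for x in r] for y in r],
--     ]
-- ===== Notes on version B (the rewrite author's own statement) =====
-- stated objective: alternative
-- what changed: Replaces A's three-stage list-doubling (extend with switch_rows, then switch_cols, then rows_to_cols of everything so far) by computing each of the 8 dihedral symmetries directly with one index-remap comprehension per output.
-- outside the precondition, e.g. on eight_versions([[]]): A returns [[[]], [[]], [[]], [[]], [[]], [[]], [[]], [[]]], B raises IndexError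
import Mathlib
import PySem

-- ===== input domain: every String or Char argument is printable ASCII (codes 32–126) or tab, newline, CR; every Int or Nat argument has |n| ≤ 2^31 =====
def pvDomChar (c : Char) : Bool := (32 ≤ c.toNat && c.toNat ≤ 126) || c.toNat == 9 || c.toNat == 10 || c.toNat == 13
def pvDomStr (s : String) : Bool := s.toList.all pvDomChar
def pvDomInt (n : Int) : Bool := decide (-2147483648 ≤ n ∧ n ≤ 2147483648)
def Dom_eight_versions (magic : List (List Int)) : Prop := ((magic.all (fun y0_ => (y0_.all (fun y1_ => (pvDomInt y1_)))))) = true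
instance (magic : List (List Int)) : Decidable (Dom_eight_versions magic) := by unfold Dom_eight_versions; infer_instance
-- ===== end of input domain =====

-- B computes each of the 8 dihedral symmetries directly by index remapping instead of
-- A's three-stage list doubling; same cost, different decomposition (objective: alternative).

-- ===== PORT A =====
-- [value for x, value in enumerate(row)] for y, row in enumerate(matrix[::-1])
def pv_switch_rows (matrix : List (List Int)) : List (List Int) :=
  (PySem.List.enumerate ((PySem.List.slice? matrix none none (-1)).getD []) 0).map
    (fun p => (PySem.List.enumerate p.2 0).map (fun q => q.2))
-- step -1 ≠ 0 so slice? is always `some`; `.getD []` only unwraps it.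

-- row[-1::-1] for y, row in enumerate(matrix)
def pv_switch_cols (matrix : List (List Int)) : List (List Int) :=
  (PySem.List.enumerate matrix 0).map
    (fun p => (PySem.List.slice? p.2 (some (-1)) none (-1)).getD [])

-- [matrix[x][y] for x, value in enumerate(row)] for y, row in enumerate(matrix)
-- matrix[x][y] via pyGetD with a junk default: exact wherever Python does not raise
-- (Pre_ below admits exactly the inputs on which no access is out of range).
def pv_rows_to_cols (matrix : List (List Int)) : List (List Int) :=
  (PySem.List.enumerate matrix 0).map
    (fun p => (PySem.List.enumerate p.2 0).map
      (fun q => PySem.List.pyGetD (PySem.List.pyGetD matrix q.1 []) p.1 0))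

def eight_versions (magic : List (List Int)) : List (List (List Int)) :=
  let squares := [magic]
  let squares := squares ++ squares.map pv_switch_rows
  let squares := squares ++ squares.map pv_switch_cols
  let squares := squares ++ squares.map pv_rows_to_cols
  squares

-- ===== PORT B =====
-- magic[i][j] with 0 ≤ i, j < n via getD (exact under Pre_: all indices in range there).
def pv_g (magic : List (List Int)) (i j : Nat) : Int := (magic.getD i []).getD j 0

def pv_tab (n : Nat) (f : Nat → Nat → Int) : List (List Int) :=
  (List.range n).map (fun y => (List.range n).map (fun x => f y x))

def eight_versions_alt (magic : List (List Int)) : List (List (List Int)) :=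
  let n := magic.length
  [ magic,
    pv_tab n (fun y x => pv_g magic (n - 1 - y) x),
    pv_tab n (fun y x => pv_g magic y (n - 1 - x)),
    pv_tab n (fun y x => pv_g magic (n - 1 - y) (n - 1 - x)),
    pv_tab n (fun y x => pv_g magic x y),
    pv_tab n (fun y x => pv_g magic (n - 1 - x) y),
    pv_tab n (fun y x => pv_g magic x (n - 1 - y)),
    pv_tab n (fun y x => pv_g magic (n - 1 - x) (n - 1 - y)) ]

-- ===== PRECONDITION & SPEC =====
-- Pre_ excludes non-square matrices: on them A raises IndexError in rows_to_cols, except in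
-- the degenerate case where every row is empty (e.g. [[]]), where A happens to return eight
-- copies of the input while B's range(n) indexing raises IndexError.
def Pre_eight_versions (magic : List (List Int)) : Prop :=
  ∀ row ∈ magic, row.length = magic.length
instance (magic : List (List Int)) : Decidable (Pre_eight_versions magic) := by unfold Pre_eight_versions; infer_instance

def pvWitness_eight_versions : List (List Int) := [[1, 2], [3, 4]]

def Spec_eight_versions (magic : List (List Int)) (out : List (List (List Int))) : Prop := out = eight_versions_alt magic
instance (magic : List (List Int)) (out : List (List (List Int))) : Decidable (Spec_eight_versions magic out) := by unfold Spec_eight_versions; infer_instance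

-- ===== CLAIM (what is proved, stated in full; the proofs are below) =====
def Claim_equal_eight_versions : Prop := ∀ (magic : List (List Int)), Dom_eight_versions magic → Pre_eight_versions magic → Spec_eight_versions magic (eight_versions magic)

-- ===== LEMMAS AND PROOFS =====

theorem pv_slice_neg1 {α : Type} (xs : List α) :
    PySem.List.slice? xs (some (-1)) none (-1) = some xs.reverse := by
  have h : PySem.List.sliceIndices xs.length (some (-1)) none (-1)
      = PySem.List.sliceIndices xs.length none none (-1) := by
    simp [PySem.List.sliceIndices]; omega
  have h2 := PySem.List.slice?_none_none_neg_one xs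
  simp only [PySem.List.slice?] at h2 ⊢
  rw [h]; exact h2

theorem map_snd_comp_enumerate {α β : Type} (xs : List α) (s : Int) (f : α → β) :
    (PySem.List.enumerate xs s).map (fun p => f p.2) = xs.map f := by
  rw [show (fun p : Int × α => f p.2) = f ∘ (fun p : Int × α => p.2) from rfl,
      ← List.map_map, PySem.List.map_snd_enumerate]

theorem pv_switch_rows_eq (M : List (List Int)) : pv_switch_rows M = M.reverse := by
  rw [pv_switch_rows, PySem.List.slice?_none_none_neg_one, Option.getD_some,
      map_snd_comp_enumerate (f := fun row => (PySem.List.enumerate row 0).map (fun q => q.2))]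
  simp [PySem.List.map_snd_enumerate]

theorem pv_switch_cols_eq (M : List (List Int)) : pv_switch_cols M = M.map List.reverse := by
  rw [pv_switch_cols]
  simp only [pv_slice_neg1, Option.getD_some]
  exact map_snd_comp_enumerate M 0 List.reverse

-- M[i] as a range comprehension over getD, for square M
theorem pv_row_tab (M : List (List Int)) (h : ∀ row ∈ M, row.length = M.length)
    (i : Nat) (hi : i < M.length) :
    (List.range M.length).map (fun x => pv_g M i x) = M[i] := by
  have hlen : M[i].length = M.length := h M[i] (M.getElem_mem hi)
  apply List.ext_getElem (by simpa using hlen.symm)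
  intro x hx hx'
  rw [List.getElem_map, List.getElem_range]
  show (M.getD i []).getD x 0 = M[i][x]
  rw [List.getD_eq_getElem M [] hi, List.getD_eq_getElem _ _ hx']

theorem pv_rows_to_cols_eq (M : List (List Int)) (h : ∀ row ∈ M, row.length = M.length) :
    pv_rows_to_cols M = pv_tab M.length (fun y x => pv_g M x y) := by
  apply List.ext_getElem (by simp [pv_rows_to_cols, pv_tab, PySem.List.length_enumerate])
  intro y hy hy'
  simp only [pv_rows_to_cols, pv_tab, List.getElem_map, PySem.List.getElem_enumerate,
    List.getElem_range]
  have hy0 : y < M.length := by simpa [pv_rows_to_cols, PySem.List.length_enumerate] using hy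
  have hlen : M[y].length = M.length := h M[y] (M.getElem_mem hy0)
  apply List.ext_getElem (by simp [PySem.List.length_enumerate, hlen])
  intro x hx hx'
  have hx0 : x < M.length := by
    simpa [PySem.List.length_enumerate, hlen] using hx
  simp only [List.getElem_map, PySem.List.getElem_enumerate, List.getElem_range]
  have e1 : ((0:Int) + (x:Int)) = ((x:Nat):Int) := by omega
  have e2 : ((0:Int) + (y:Int)) = ((y:Nat):Int) := by omega
  simp [e1, e2, PySem.List.pyGetD_natCast, pv_g]

theorem pv_tab_congr (n : Nat) (f g : Nat → Nat → Int)
    (h : ∀ y < n, ∀ x < n, f y x = g y x) : pv_tab n f = pv_tab n g := by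
  unfold pv_tab
  refine List.map_congr_left (fun y hy => ?_)
  refine List.map_congr_left (fun x hx => ?_)
  exact h y (List.mem_range.mp hy) x (List.mem_range.mp hx)

theorem pv_getD_eq (M : List (List Int)) (i : Nat) (hi : i < M.length) :
    M.getD i [] = M[i] := List.getD_eq_getElem M [] hi

theorem pv_g_reverse (M : List (List Int)) (x j : Nat) (hx : x < M.length) :
    pv_g M.reverse x j = pv_g M (M.length - 1 - x) j := by
  unfold pv_g
  rw [pv_getD_eq M.reverse x (by simpa using hx), List.getElem_reverse,
      pv_getD_eq M _ (by omega)]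

theorem pv_g_maprev (M : List (List Int)) (h : ∀ row ∈ M, row.length = M.length)
    (x y : Nat) (hx : x < M.length) (hy : y < M.length) :
    pv_g (M.map List.reverse) x y = pv_g M x (M.length - 1 - y) := by
  unfold pv_g
  have hlen : M[x].length = M.length := h M[x] (M.getElem_mem hx)
  rw [pv_getD_eq (M.map List.reverse) x (by simpa using hx), List.getElem_map,
      pv_getD_eq M x hx,
      List.getD_eq_getElem _ _ (by simpa [hlen] using hy), List.getElem_reverse,
      List.getD_eq_getElem _ _ (by omega)]
  congr 1
  omega

theorem pv_rev_tab (M : List (List Int)) (h : ∀ row ∈ M, row.length = M.length) :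
    M.reverse = pv_tab M.length (fun y x => pv_g M (M.length - 1 - y) x) := by
  apply List.ext_getElem (by simp [pv_tab])
  intro y hy hy'
  have hy0 : y < M.length := by simpa using hy
  rw [List.getElem_reverse]
  show M[M.length - 1 - y] = (pv_tab M.length fun y x => pv_g M (M.length - 1 - y) x)[y]
  simp only [pv_tab]
  rw [List.getElem_map, List.getElem_range, pv_row_tab M h _ (by omega)]

theorem pv_maprev_tab (M : List (List Int)) (h : ∀ row ∈ M, row.length = M.length) :
    M.map List.reverse = pv_tab M.length (fun y x => pv_g M y (M.length - 1 - x)) := by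
  apply List.ext_getElem (by simp [pv_tab])
  intro y hy hy'
  have hy0 : y < M.length := by simpa using hy
  have hlen : M[y].length = M.length := h M[y] (M.getElem_mem hy0)
  rw [List.getElem_map]
  simp only [pv_tab]
  rw [List.getElem_map, List.getElem_range]
  apply List.ext_getElem (by simpa using hlen)
  intro x hx hx'
  have hx0 : x < M.length := by simpa using hx'
  rw [List.getElem_reverse, List.getElem_map, List.getElem_range]
  show M[y][M[y].length - 1 - x] = pv_g M y (M.length - 1 - x)
  rw [pv_g, pv_getD_eq M y hy0, List.getD_eq_getElem _ _ (by omega)]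
  congr 1
  omega

theorem main_eq (M : List (List Int)) (h : ∀ row ∈ M, row.length = M.length) :
    eight_versions M = eight_versions_alt M := by
  have hrev : ∀ row ∈ M.reverse, row.length = M.reverse.length := by
    intro r hr; rw [List.length_reverse]; exact h r (List.mem_reverse.mp hr)
  have hmaprev : ∀ row ∈ M.map List.reverse, row.length = (M.map List.reverse).length := by
    intro r hr
    rw [List.length_map]
    obtain ⟨r0, hr0, rfl⟩ := List.mem_map.mp hr
    rw [List.length_reverse]; exact h r0 hr0
  have hrevmaprev : ∀ row ∈ M.reverse.map List.reverse,
      row.length = (M.reverse.map List.reverse).length := by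
    intro r hr
    rw [List.length_map]
    obtain ⟨r0, hr0, rfl⟩ := List.mem_map.mp hr
    rw [List.length_reverse]; exact hrev r0 hr0
  show [M, pv_switch_rows M, pv_switch_cols M, pv_switch_cols (pv_switch_rows M),
        pv_rows_to_cols M, pv_rows_to_cols (pv_switch_rows M),
        pv_rows_to_cols (pv_switch_cols M),
        pv_rows_to_cols (pv_switch_cols (pv_switch_rows M))] = eight_versions_alt M
  rw [pv_switch_rows_eq, pv_switch_cols_eq, pv_switch_cols_eq,
      pv_rows_to_cols_eq M h, pv_rows_to_cols_eq _ hrev, pv_rows_to_cols_eq _ hmaprev,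
      pv_rows_to_cols_eq _ hrevmaprev]
  show _ = [M,
    pv_tab M.length (fun y x => pv_g M (M.length - 1 - y) x),
    pv_tab M.length (fun y x => pv_g M y (M.length - 1 - x)),
    pv_tab M.length (fun y x => pv_g M (M.length - 1 - y) (M.length - 1 - x)),
    pv_tab M.length (fun y x => pv_g M x y),
    pv_tab M.length (fun y x => pv_g M (M.length - 1 - x) y),
    pv_tab M.length (fun y x => pv_g M x (M.length - 1 - y)),
    pv_tab M.length (fun y x => pv_g M (M.length - 1 - x) (M.length - 1 - y))]
  rw [← pv_rev_tab M h, ← pv_maprev_tab M h]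
  have e4 : List.map List.reverse M.reverse
      = pv_tab M.length (fun y x => pv_g M (M.length - 1 - y) (M.length - 1 - x)) := by
    rw [pv_maprev_tab M.reverse hrev, List.length_reverse]
    exact pv_tab_congr _ _ _ (fun y hy x hx => pv_g_reverse M y (M.length - 1 - x) hy)
  have e6 : pv_tab M.reverse.length (fun y x => pv_g M.reverse x y)
      = pv_tab M.length (fun y x => pv_g M (M.length - 1 - x) y) := by
    rw [List.length_reverse]
    exact pv_tab_congr _ _ _ (fun y hy x hx => pv_g_reverse M x y hx)
  have e7 : pv_tab (List.map List.reverse M).length (fun y x => pv_g (List.map List.reverse M) x y)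
      = pv_tab M.length (fun y x => pv_g M x (M.length - 1 - y)) := by
    rw [List.length_map]
    exact pv_tab_congr _ _ _ (fun y hy x hx => pv_g_maprev M h x y hx hy)
  have e8 : pv_tab (List.map List.reverse M.reverse).length
        (fun y x => pv_g (List.map List.reverse M.reverse) x y)
      = pv_tab M.length (fun y x => pv_g M (M.length - 1 - x) (M.length - 1 - y)) := by
    rw [List.length_map, List.length_reverse]
    refine pv_tab_congr _ _ _ (fun y hy x hx => ?_)
    rw [pv_g_maprev M.reverse hrev x y (by simpa using hx) (by simpa using hy),
        List.length_reverse, pv_g_reverse M x (M.length - 1 - y) hx]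
  rw [e6, e7, e8, e4]

-- ===== VERDICT (by name: the statement is the Claim_ definition above) =====
theorem eight_versions_spec : Claim_equal_eight_versions := by
  intro magic _ hpre
  exact main_eq magic hpre
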